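-- pv_equiv track=rewrite | github.com/serje3/spimp | lab1.py | filter_consecutive_duplicates
-- ===== SOURCE A (Python) =====
-- def filter_consecutive_duplicates(sequence, n):
--     result = []
--     current_count = 0
--     prev_element = None
--
--     for element in sequence:
--         if element == prev_element:
--             current_count += 1
--         else:
--             current_count = 1
--
--         if current_count <= n:
--             result.append(element)
--
--         prev_element = element
--
--     return result
-- ===== SOURCE B (Python) =====
-- def filter_consecutive_duplicates(sequence, n):
--     # Run-grouping two-pointer pass: for each maximal run of equal
--     # consecutive elements, emit its first k elements (k = max(n, 0)).
--     result = []
--     k = n if n > 0 else 0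
--     i, L = 0, len(sequence)
--     while i < L:
--         j = i
--         while j < L and sequence[j] == sequence[i]:
--             j += 1
--         result.extend(sequence[i:min(i + k, j)])
--         i = j
--     return result
-- ===== Notes on version B (the rewrite author's own statement) =====
-- stated objective: alternative
-- what changed: Replaces the per-element counter/prev-element state machine with a two-pointer pass over maximal runs of equal consecutive elements, emitting the first max(n,0) elements of each run.
import Mathlib
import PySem

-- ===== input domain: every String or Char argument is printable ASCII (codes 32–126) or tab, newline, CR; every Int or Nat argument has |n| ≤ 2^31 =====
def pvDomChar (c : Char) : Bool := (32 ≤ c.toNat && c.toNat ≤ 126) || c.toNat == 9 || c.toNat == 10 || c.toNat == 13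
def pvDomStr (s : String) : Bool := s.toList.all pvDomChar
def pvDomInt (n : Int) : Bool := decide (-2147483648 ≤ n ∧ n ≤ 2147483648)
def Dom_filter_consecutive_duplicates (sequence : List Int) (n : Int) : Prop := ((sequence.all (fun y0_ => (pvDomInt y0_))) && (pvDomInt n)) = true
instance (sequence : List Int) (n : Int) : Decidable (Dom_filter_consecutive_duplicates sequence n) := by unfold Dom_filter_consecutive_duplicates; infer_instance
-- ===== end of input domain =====

-- B replaces A's per-element counter/prev state machine by a run-grouping pass
-- (emit the first max(n,0) elements of each maximal run); alternative, same cost.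


-- ===== PORT A =====
-- state: (result, current_count, prev_element)
def filter_consecutive_duplicates (sequence : List Int) (n : Int) : List Int :=
  (sequence.foldl
    (fun (st : List Int × Int × Option Int) element =>
      let current_count : Int := if st.2.2 = some element then st.2.1 + 1 else 1
      let result := if current_count ≤ n then st.1 ++ [element] else st.1
      (result, current_count, some element))
    ([], 0, none)).1

-- ===== PORT B =====
-- for each maximal run of equal consecutive elements, emit its first k elements
def fcdRuns (seq : List Int) (k : Nat) : List Int :=
  match seq with
  | [] => []
  | x :: xs =>
      ((x :: xs.takeWhile (· = x)).take k) ++ fcdRuns (xs.dropWhile (· = x)) k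
termination_by seq.length
decreasing_by
  simp only [List.length_cons]
  exact Nat.lt_succ_of_le (List.length_dropWhile_le _ _)

def filter_consecutive_duplicates_alt (sequence : List Int) (n : Int) : List Int :=
  fcdRuns sequence (if n > 0 then n.toNat else 0)

-- ===== PRECONDITION & SPEC =====
def Spec_filter_consecutive_duplicates (sequence : List Int) (n : Int) (out : List Int) : Prop := out = filter_consecutive_duplicates_alt sequence n
instance (sequence : List Int) (n : Int) (out : List Int) : Decidable (Spec_filter_consecutive_duplicates sequence n out) := by unfold Spec_filter_consecutive_duplicates; infer_instance

-- ===== CLAIM (what is proved, stated in full; the proofs are below) =====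
def Claim_equal_filter_consecutive_duplicates : Prop := ∀ (sequence : List Int) (n : Int), Dom_filter_consecutive_duplicates sequence n → Spec_filter_consecutive_duplicates sequence n (filter_consecutive_duplicates sequence n)

-- ===== LEMMAS AND PROOFS =====

-- the "remaining output" of A's loop from state (count c, prev p)
def fcdG (n : Int) : List Int → Int → Option Int → List Int
  | [], _, _ => []
  | x :: xs, c, p =>
      let c' : Int := if p = some x then c + 1 else 1
      (if c' ≤ n then [x] else []) ++ fcdG n xs c' (some x)

theorem fcdFold_eq_g (n : Int) (seq : List Int) :
    ∀ (res : List Int) (c : Int) (p : Option Int),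
      (seq.foldl
        (fun (st : List Int × Int × Option Int) element =>
          let current_count : Int := if st.2.2 = some element then st.2.1 + 1 else 1
          let result := if current_count ≤ n then st.1 ++ [element] else st.1
          (result, current_count, some element))
        (res, c, p)).1 = res ++ fcdG n seq c p := by
  induction seq with
  | nil => intro res c p; simp [fcdG]
  | cons x xs ih =>
      intro res c p
      simp only [List.foldl_cons, fcdG]
      by_cases hp : p = some x
      · simp only [hp, if_true]
        by_cases hc : c + 1 ≤ n
        · simp [hc, ih]
        · simp [hc, ih]
      · simp only [if_neg hp]
        by_cases hc : (1 : Int) ≤ n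
        · simp [hc, ih]
        · simp [hc, ih]

-- fresh start: when the head differs from p, the incoming state is irrelevant
theorem fcdG_fresh (n : Int) (seq : List Int) (c c' : Int) (p p' : Option Int)
    (h : ∀ x, seq.head? = some x → p ≠ some x ∧ p' ≠ some x) :
    fcdG n seq c p = fcdG n seq c' p' := by
  cases seq with
  | nil => rfl
  | cons x xs =>
      obtain ⟨h1, h2⟩ := h x rfl
      simp [fcdG, h1, h2]

-- within a run of copies of x, A keeps exactly the first (n - c).toNat of them
theorem fcdG_run (n : Int) (run : List Int) :
    ∀ (x : Int) (rest : List Int) (c : Int), (∀ y ∈ run, y = x) →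
      fcdG n (run ++ rest) c (some x)
        = run.take (n - c).toNat ++ fcdG n rest (c + run.length) (some x) := by
  induction run with
  | nil => intro x rest c _; simp
  | cons y ys ih =>
      intro x rest c hall
      have hy : y = x := hall y (by simp)
      subst hy
      have hys : ∀ z ∈ ys, z = y := fun z hz => hall z (by simp [hz])
      simp only [List.cons_append, fcdG, if_true]
      by_cases hc : c + 1 ≤ n
      · have ht : (n - c).toNat = (n - (c + 1)).toNat + 1 := by omega
        rw [ih y rest (c + 1) hys, ht]
        simp only [List.take_succ_cons, if_pos hc]
        simp [add_comm, add_left_comm]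
      · have ht : (n - c).toNat = 0 := by omega
        have ht' : (n - (c + 1)).toNat = 0 := by omega
        rw [ih y rest (c + 1) hys, ht, ht']
        simp only [List.take_zero, List.nil_append, if_neg hc]
        simp [add_comm, add_left_comm]

theorem fcdG_eq_runs (n : Int) (seq : List Int) :
    fcdG n seq 0 none = fcdRuns seq (if n > 0 then n.toNat else 0) := by
  induction seq using fcdRuns.induct with
  | case1 => simp [fcdG, fcdRuns]
  | case2 x xs ih =>
      have hsplit : xs = xs.takeWhile (· = x) ++ xs.dropWhile (· = x) :=
        (List.takeWhile_append_dropWhile).symm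
      have hall : ∀ y ∈ xs.takeWhile (· = x), y = x := by
        intro y hy
        have := List.mem_takeWhile_imp hy
        simpa using this
      have hhead : ∀ z, (xs.dropWhile (· = x)).head? = some z → z ≠ x := by
        intro z hz
        have := List.head?_dropWhile_not (p := (· = x)) (l := xs)
        rw [hz] at this
        simpa using this
      rw [fcdRuns]
      simp only [fcdG, reduceCtorEq, if_false]
      rw [show fcdG n xs 1 (some x) = fcdG n (xs.takeWhile (· = x) ++ xs.dropWhile (· = x)) 1 (some x) by rw [← hsplit]]
      rw [fcdG_run n _ x _ 1 hall]
      rw [fcdG_fresh n (xs.dropWhile (· = x)) (1 + (xs.takeWhile (· = x)).length) 0 (some x) none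
        (by intro z hz; exact ⟨by simpa using fun h => (hhead z hz) h.symm, by simp⟩)]
      rw [ih]
      by_cases hn : (1 : Int) ≤ n
      · have hpos : n > 0 := by omega
        have hk : (if n > 0 then n.toNat else 0) = (n - 1).toNat + 1 := by
          rw [if_pos hpos]; omega
        simp [hn, hk]
      · have hpos : ¬ n > 0 := by omega
        have hk : (if n > 0 then n.toNat else 0) = 0 := by rw [if_neg hpos]
        have h1 : (n - 1).toNat = 0 := by omega
        simp [hn, hk, h1]

-- ===== VERDICT (by name: the statement is the Claim_ definition above) =====
theorem filter_consecutive_duplicates_spec : Claim_equal_filter_consecutive_duplicates := by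
  intro sequence n _
  unfold Spec_filter_consecutive_duplicates filter_consecutive_duplicates filter_consecutive_duplicates_alt
  rw [fcdFold_eq_g, fcdG_eq_runs]
  simp
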